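-- pv_equiv track=rewrite | github.com/d-anielcode/edgerunner | bucket_analysis.py | max_consec_losses
-- ===== SOURCE A (Python) =====
-- def max_consec_losses(pnl_arr):
--     mx = cur = 0
--     for v in pnl_arr:
--         if v < 0:
--             cur += 1
--             if cur > mx:
--                 mx = cur
--         else:
--             cur = 0
--     return mx
-- ===== SOURCE B (Python) =====
-- def _neg_runs(pnl_arr):
--     """Lengths of the maximal runs of consecutive negative values."""
--     runs = []
--     i = 0
--     n = len(pnl_arr)
--     while i < n:
--         if pnl_arr[i] < 0:
--             j = i
--             while j < n and pnl_arr[j] < 0: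
--                 j += 1
--             runs.append(j - i)
--             i = j
--         else:
--             i += 1
--     return runs
--
-- def max_consec_losses(pnl_arr):
--     best = 0
--     for r in _neg_runs(pnl_arr):
--         if r > best:
--             best = r
--     return best
-- ===== Notes on version B (the rewrite author's own statement) =====
-- stated objective: alternative
-- what changed: Instead of one scan maintaining a running counter and running maximum, B first decomposes the sequence into the list of maximal negative-run lengths and then takes the maximum of that list (default 0).
import Mathlib
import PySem

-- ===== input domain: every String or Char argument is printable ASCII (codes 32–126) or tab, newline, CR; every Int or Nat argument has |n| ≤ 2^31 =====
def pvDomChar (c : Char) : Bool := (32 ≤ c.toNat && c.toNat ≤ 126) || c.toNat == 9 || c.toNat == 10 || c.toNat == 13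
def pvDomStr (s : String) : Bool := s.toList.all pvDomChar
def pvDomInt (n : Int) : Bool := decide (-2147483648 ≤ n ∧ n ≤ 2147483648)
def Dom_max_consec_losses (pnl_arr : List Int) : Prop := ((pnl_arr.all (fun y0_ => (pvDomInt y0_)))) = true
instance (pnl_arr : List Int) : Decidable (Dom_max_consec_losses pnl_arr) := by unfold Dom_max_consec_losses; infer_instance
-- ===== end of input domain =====

-- B decomposes the sequence into maximal negative-run lengths first, then maximises; A keeps a running counter. Alternative decomposition, same cost.

-- ===== PORT A =====
-- literal transliteration of A's single loop over (mx, cur)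
def max_consec_losses (pnl_arr : List Int) : Int :=
  (pnl_arr.foldl
    (fun (s : Int × Int) v =>
      if v < 0 then
        let cur := s.2 + 1
        (if cur > s.1 then cur else s.1, cur)
      else (s.1, 0))
    (0, 0)).1

-- ===== PORT B =====
-- _neg_runs: the inner 'while j' scan is the length of the leading negative run
-- (takeWhile), and 'i = j' skips it (dropWhile); a non-negative head is skipped.
def negRuns : List Int → List Int
  | [] => []
  | v :: vs =>
    if v < 0 then
      (1 + ((vs.takeWhile (fun x => x < 0)).length : Int)) ::
        negRuns (vs.dropWhile (fun x => x < 0))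
    else negRuns vs
termination_by l => l.length
decreasing_by
  · exact Nat.lt_succ_of_le (List.length_dropWhile_le _ _)
  · exact Nat.lt_succ_self _

def max_consec_losses_alt (pnl_arr : List Int) : Int :=
  (negRuns pnl_arr).foldl (fun best r => if r > best then r else best) 0

-- ===== PRECONDITION & SPEC =====
def Spec_max_consec_losses (pnl_arr : List Int) (out : Int) : Prop := out = max_consec_losses_alt pnl_arr
instance (pnl_arr : List Int) (out : Int) : Decidable (Spec_max_consec_losses pnl_arr out) := by unfold Spec_max_consec_losses; infer_instance

-- ===== CLAIM (what is proved, stated in full; the proofs are below) =====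
def Claim_equal_max_consec_losses : Prop := ∀ (pnl_arr : List Int), Dom_max_consec_losses pnl_arr → Spec_max_consec_losses pnl_arr (max_consec_losses pnl_arr)

-- ===== LEMMAS AND PROOFS =====

-- characterisation of the best run reachable from a partial current run
def best (cur : Int) : List Int → Int
  | [] => 0
  | v :: vs => if v < 0 then max (cur + 1) (best (cur + 1) vs) else best 0 vs

theorem best_nonneg (xs : List Int) : ∀ cur, 0 ≤ best cur xs := by
  induction xs with
  | nil => intro cur; simp [best]
  | cons v vs ih =>
    intro cur
    by_cases h : v < 0 <;> simp [best, h]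
    · exact Or.inr (ih _)
    · exact ih 0

-- A's loop computes max mx (best cur xs)
theorem if_gt_max (a c : Int) : (if a > c then a else c) = max c a := by
  rw [max_def]; split_ifs <;> omega

theorem A_loop (xs : List Int) : ∀ mx cur : Int, 0 ≤ mx →
    (xs.foldl
      (fun (s : Int × Int) v =>
        if v < 0 then
          let cur := s.2 + 1
          (if cur > s.1 then cur else s.1, cur)
        else (s.1, 0))
      (mx, cur)).1 = max mx (best cur xs) := by
  induction xs with
  | nil => intro mx cur hmx; simp [best]; omega
  | cons v vs ih =>
    intro mx cur hmx
    by_cases h : v < 0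
    · simp only [List.foldl_cons, if_pos h]
      rw [show (if cur + 1 > mx then cur + 1 else mx) = max mx (cur + 1) from if_gt_max _ _]
      rw [ih (max mx (cur + 1)) (cur + 1) (le_max_of_le_left hmx)]
      simp [best, h, max_assoc]
    · simp only [List.foldl_cons, if_neg h]
      rw [ih mx 0 hmx]
      simp [best, h]

-- the if-fold of B is the max-fold
theorem fold_if_eq_fold_max (l : List Int) : ∀ c : Int,
    l.foldl (fun best r => if r > best then r else best) c = l.foldl max c := by
  intro c
  simp only [if_gt_max]

theorem foldl_max_comm (l : List Int) : ∀ a b : Int,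
    l.foldl max (max a b) = max a (l.foldl max b) := by
  induction l with
  | nil => intro a b; rfl
  | cons c l ih =>
    intro a b
    simp only [List.foldl_cons, max_assoc, ih]

theorem le_foldl_max (l : List Int) (c : Int) : c ≤ l.foldl max c := by
  have h := foldl_max_comm l c c
  rw [max_self] at h
  rw [h]; exact le_max_left _ _

theorem negRuns_fold (vs : List Int) :
    (negRuns vs).foldl max 0 =
      max ((vs.takeWhile (fun x => x < 0)).length : Int)
        ((negRuns (vs.dropWhile (fun x => x < 0))).foldl max 0) := by
  cases vs with
  | nil => simp [negRuns]
  | cons v vs =>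
    by_cases h : v < 0
    · simp only [negRuns, if_pos h, List.takeWhile_cons, List.dropWhile_cons,
        decide_eq_true h, if_true, List.foldl_cons, List.length_cons]
      rw [show (max (0:Int) (1 + ((vs.takeWhile (fun x => x < 0)).length : Int)))
            = max ((1 + ((vs.takeWhile (fun x => x < 0)).length : Int))) 0 from max_comm _ _]
      rw [foldl_max_comm]
      push_cast
      ring_nf
    · simp only [List.takeWhile_cons, List.dropWhile_cons]
      rw [if_neg (by simpa using h), if_neg (by simpa using h)]
      rw [show negRuns (v :: vs) = negRuns vs from by simp [negRuns, h]]
      simp only [List.length_nil, Int.natCast_zero]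
      exact (max_eq_right (le_foldl_max _ 0)).symm

theorem best_eq (xs : List Int) : ∀ cur : Int, 0 ≤ cur →
    max cur (best cur xs) =
      max (cur + ((xs.takeWhile (fun x => x < 0)).length : Int))
        ((negRuns (xs.dropWhile (fun x => x < 0))).foldl max 0) := by
  induction xs with
  | nil => intro cur hc; simp [best, negRuns]
  | cons v vs ih =>
    intro cur hc
    by_cases h : v < 0
    · simp only [best, if_pos h, List.takeWhile_cons, List.dropWhile_cons,
        decide_eq_true h, if_true, List.length_cons]
      rw [← max_assoc, max_eq_right (by omega : cur ≤ cur + 1)]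
      rw [ih (cur + 1) (by omega)]
      push_cast; ring_nf
    · simp only [best, if_neg h, List.takeWhile_cons, List.dropWhile_cons]
      rw [if_neg (by simpa using h), if_neg (by simpa using h)]
      simp only [List.length_nil, Int.natCast_zero, add_zero]
      have h0 := ih 0 le_rfl
      rw [max_eq_right (best_nonneg vs 0)] at h0
      rw [h0, zero_add, ← negRuns_fold]
      rw [show negRuns (v :: vs) = negRuns vs from by simp [negRuns, h]]

-- ===== VERDICT (by name: the statement is the Claim_ definition above) =====
theorem max_consec_losses_spec : Claim_equal_max_consec_losses := by
  intro pnl_arr _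
  unfold Spec_max_consec_losses max_consec_losses max_consec_losses_alt
  rw [A_loop pnl_arr 0 0 le_rfl, fold_if_eq_fold_max]
  have h := best_eq pnl_arr 0 le_rfl
  simp only [zero_add] at h
  rw [max_eq_right (best_nonneg pnl_arr 0)] at h
  rw [h, ← negRuns_fold]
  exact max_eq_right (le_foldl_max _ 0)
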